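-- pv_equiv track=rewrite | github.com/The-Outsider-97/SLAI | src/agents/reader_agent.py | _merge_recovered_with_originals
-- ===== SOURCE A (Python) =====
-- from typing import Any, Awaitable, Coroutine, Dict, Iterable, List, Mapping, TypeVar, Optional, Sequence, Tuple
--
-- def _merge_recovered_with_originals(
--     original_docs: Sequence[Mapping[str, Any]],
--     recovered_docs: Sequence[Mapping[str, Any]],
-- ) -> List[Dict[str, Any]]:
--     """Keep original parse order while replacing only successfully recovered docs."""
--
--     recovered_by_source = {str(doc.get("source", "unknown")): dict(doc) for doc in recovered_docs if isinstance(doc, Mapping)}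
--     merged: List[Dict[str, Any]] = []
--     for original in original_docs:
--         source = str(original.get("source", "unknown"))
--         merged.append(recovered_by_source.get(source, dict(original)))
--     return merged
-- ===== SOURCE B (Python) =====
-- from typing import Any, Dict, List, Mapping, Sequence
--
-- def _merge_recovered_with_originals(
--     original_docs: Sequence[Mapping[str, Any]],
--     recovered_docs: Sequence[Mapping[str, Any]],
-- ) -> List[Dict[str, Any]]:
--     """Keep original parse order while replacing only successfully recovered docs."""
--     # Start from copies of the originals, then scatter each recovered doc (in
--     # order) into every slot whose source key matches; later recovered docs
--     # overwrite earlier ones, so duplicates naturally resolve last-wins.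
--     keys = [str(o.get("source", "unknown")) for o in original_docs]
--     merged: List[Dict[str, Any]] = [dict(o) for o in original_docs]
--     for doc in recovered_docs:
--         if isinstance(doc, Mapping):
--             k = str(doc.get("source", "unknown"))
--             for i, key in enumerate(keys):
--                 if key == k:
--                     merged[i] = dict(doc)
--     return merged
-- ===== Notes on version B (the rewrite author's own statement) =====
-- stated objective: alternative
-- what changed: Inverts the traversal: instead of indexing recovered_docs and looking up each original, B initialises the result with copies of the originals and makes one forward pass over recovered_docs, scattering each recovered doc into every result slot whose source key matches (later writes overwrite earlier, so duplicates resolve last-wins).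
import Mathlib
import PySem

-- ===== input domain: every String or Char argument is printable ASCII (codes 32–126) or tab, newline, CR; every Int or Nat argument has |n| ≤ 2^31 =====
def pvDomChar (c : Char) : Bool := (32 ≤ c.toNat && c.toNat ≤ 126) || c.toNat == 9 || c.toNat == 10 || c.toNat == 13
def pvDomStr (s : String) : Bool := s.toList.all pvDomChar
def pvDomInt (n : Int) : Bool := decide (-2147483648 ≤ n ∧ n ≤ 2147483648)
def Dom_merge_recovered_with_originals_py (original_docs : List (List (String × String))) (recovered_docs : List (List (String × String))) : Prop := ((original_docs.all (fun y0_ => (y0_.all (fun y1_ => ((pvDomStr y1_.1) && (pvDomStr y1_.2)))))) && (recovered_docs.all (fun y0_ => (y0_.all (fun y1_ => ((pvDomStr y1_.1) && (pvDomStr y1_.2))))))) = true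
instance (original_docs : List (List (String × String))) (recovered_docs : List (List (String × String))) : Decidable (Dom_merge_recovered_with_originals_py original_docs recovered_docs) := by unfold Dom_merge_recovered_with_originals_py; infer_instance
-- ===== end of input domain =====

-- B inverts A's traversal: A indexes recovered_docs by source key and looks each
-- original up; B starts from copies of the originals and scatters each recovered
-- doc (forward pass, later writes win) into matching slots. Same return value.

-- ===== PORT A =====
-- doc.get("source", "unknown") on a Python Mapping; the assoc list is read with
-- Python dict semantics (last duplicate key wins), exact via PySem.Dict.ofList.
def pvSourceKey (doc : List (String × String)) : String :=
  (PySem.Dict.ofList doc).getD "source" "unknown"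

-- dict(doc): a fresh dict built from the mapping's items (duplicate keys: last wins)
def pvDictCopy (doc : List (String × String)) : List (String × String) :=
  (PySem.Dict.ofList doc).items

def merge_recovered_with_originals_py (original_docs : List (List (String × String))) (recovered_docs : List (List (String × String))) : List (List (String × String)) :=
  -- recovered_by_source = {str(doc.get("source","unknown")): dict(doc) for doc in recovered_docs}
  -- (isinstance(doc, Mapping) is always true under the type convention)
  let recovered_by_source : PySem.Dict String (List (String × String)) :=
    recovered_docs.foldl (fun d doc => d.insert (pvSourceKey doc) (pvDictCopy doc)) PySem.Dict.empty
  -- for original in original_docs: merged.append(recovered_by_source.get(source, dict(original)))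
  original_docs.foldl
    (fun merged original =>
      merged ++ [recovered_by_source.getD (pvSourceKey original) (pvDictCopy original)]) []

-- ===== PORT B =====
def merge_recovered_with_originals_py_alt (original_docs : List (List (String × String))) (recovered_docs : List (List (String × String))) : List (List (String × String)) :=
  -- merged starts as [dict(o) for o in original_docs], paired with its keys list;
  -- for doc in recovered_docs: for i, key in enumerate(keys): if key == k: merged[i] = dict(doc)
  (recovered_docs.foldl
    (fun st doc =>
      let k := pvSourceKey doc
      st.map (fun p => if p.1 == k then (p.1, pvDictCopy doc) else p))
    (original_docs.map (fun o => (pvSourceKey o, pvDictCopy o)))).map Prod.snd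

-- ===== PRECONDITION & SPEC =====
def Spec_merge_recovered_with_originals_py (original_docs : List (List (String × String))) (recovered_docs : List (List (String × String))) (out : List (List (String × String))) : Prop := out = merge_recovered_with_originals_py_alt original_docs recovered_docs
instance (original_docs : List (List (String × String))) (recovered_docs : List (List (String × String))) (out : List (List (String × String))) : Decidable (Spec_merge_recovered_with_originals_py original_docs recovered_docs out) := by unfold Spec_merge_recovered_with_originals_py; infer_instance

-- ===== CLAIM (what is proved, stated in full; the proofs are below) =====
def Claim_equal_merge_recovered_with_originals_py : Prop := ∀ (original_docs : List (List (String × String))) (recovered_docs : List (List (String × String))), Dom_merge_recovered_with_originals_py original_docs recovered_docs → Spec_merge_recovered_with_originals_py original_docs recovered_docs (merge_recovered_with_originals_py original_docs recovered_docs)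

-- ===== LEMMAS AND PROOFS =====

-- A's dict, looked up at k, yields the LAST recovered doc whose source key is k.
theorem getD_foldl_insert_key (rs : List (List (String × String)))
    (d0 : PySem.Dict String (List (String × String))) (k : String) (dflt : List (String × String)) :
    (rs.foldl (fun d doc => d.insert (pvSourceKey doc) (pvDictCopy doc)) d0).getD k dflt =
      match rs.reverse.find? (fun doc => pvSourceKey doc == k) with
      | some doc => pvDictCopy doc
      | none => d0.getD k dflt := by
  induction rs generalizing d0 with
  | nil => simp
  | cons r rs ih =>
    simp only [List.foldl_cons, List.reverse_cons, List.find?_append, ih]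
    cases hf : rs.reverse.find? (fun doc => pvSourceKey doc == k) with
    | some doc => simp [Option.or]
    | none =>
      simp only [Option.or, List.find?_cons, List.find?_nil]
      by_cases hk : pvSourceKey r == k
      · simp [(by simpa using hk : pvSourceKey r = k)]
      · have hne : k ≠ pvSourceKey r := fun h => hk (by simp [h])
        simp [hk, PySem.Dict.getD_insert, hne]

theorem foldl_append_eq_map (f : List (String × String) → List (String × String))
    (l : List (List (String × String))) (acc : List (List (String × String))) :
    l.foldl (fun merged original => merged ++ [f original]) acc = acc ++ l.map f := by
  induction l generalizing acc with
  | nil => simp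
  | cons x xs ih => simp [ih]

-- B's scatter fold, applied slotwise: each slot ends up holding the LAST recovered
-- doc whose source key matches its key (or its initial value if none matches).
theorem scatter_foldl (rs : List (List (String × String)))
    (st : List (String × List (String × String))) :
    rs.foldl
      (fun st doc =>
        let k := pvSourceKey doc
        st.map (fun p => if p.1 == k then (p.1, pvDictCopy doc) else p)) st =
    st.map (fun p =>
      match rs.reverse.find? (fun doc => pvSourceKey doc == p.1) with
      | some doc => (p.1, pvDictCopy doc)
      | none => p) := by
  induction rs generalizing st with
  | nil => simp
  | cons r rs ih =>
    simp only [List.foldl_cons, ih, List.map_map, List.reverse_cons, List.find?_append]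
    refine List.map_congr_left ?_
    intro p _
    simp only [Function.comp]
    by_cases hk : p.1 = pvSourceKey r
    · rw [if_pos (by simpa using hk)]
      simp only [hk]
      cases hf : rs.reverse.find? (fun doc => pvSourceKey doc == pvSourceKey r) with
      | some doc => simp [Option.or]
      | none => simp [Option.or]
    · have h1 : (p.1 == pvSourceKey r) = false := by simpa using hk
      have h2 : (pvSourceKey r == p.1) = false := by
        simpa using fun h => hk h.symm
      cases hf : rs.reverse.find? (fun doc => pvSourceKey doc == p.1) with
      | some doc => simp [hf, Option.or, h1]
      | none => simp [hf, Option.or, h1, h2]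

-- ===== VERDICT (by name: the statement is the Claim_ definition above) =====
theorem merge_recovered_with_originals_py_spec : Claim_equal_merge_recovered_with_originals_py := by
  intro original_docs recovered_docs _
  unfold Spec_merge_recovered_with_originals_py merge_recovered_with_originals_py
    merge_recovered_with_originals_py_alt
  rw [foldl_append_eq_map, scatter_foldl]
  simp only [List.nil_append, List.map_map]
  refine List.map_congr_left ?_
  intro o _
  simp only [Function.comp]
  rw [getD_foldl_insert_key]
  cases hf : recovered_docs.reverse.find? (fun doc => pvSourceKey doc == pvSourceKey o) <;> simp
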